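-- pv_equiv track=rewrite | github.com/strangeloopcanon/Janus | scripts/convert_bank_for_target.py | default_alignment_prompts
-- ===== SOURCE A (Python) =====
-- from typing import Dict, List, Tuple
--
-- def default_alignment_prompts(n: int) -> List[str]:
--     seed_q = [
--         "Explain the environmental impact of electric vehicles.",
--         "How should I apologize to a colleague professionally?",
--         "Summarize key points of a recent news article about inflation.",
--         "What are the trade-offs between privacy and personalization?",
--         "Describe steps to troubleshoot a network outage.",
--         "Give feedback on this paragraph to improve clarity.",
--         "Outline a plan to learn Python efficiently.",
--         "Draft a response to a critical customer review.",
--         "Explain backpropagation to a high-school student.",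
--         "Describe benefits and risks of GM crops neutrally.",
--     ]
--     out = []
--     i = 0
--     while len(out) < n:
--         out.append(seed_q[i % len(seed_q)])
--         i += 1
--     return out
-- ===== SOURCE B (Python) =====
-- from typing import Dict, List, Tuple
--
-- def default_alignment_prompts(n: int) -> List[str]:
--     seed_q = [
--         "Explain the environmental impact of electric vehicles.",
--         "How should I apologize to a colleague professionally?",
--         "Summarize key points of a recent news article about inflation.",
--         "What are the trade-offs between privacy and personalization?",
--         "Describe steps to troubleshoot a network outage.",
--         "Give feedback on this paragraph to improve clarity.",
--         "Outline a plan to learn Python efficiently.",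
--         "Draft a response to a critical customer review.",
--         "Explain backpropagation to a high-school student.",
--         "Describe benefits and risks of GM crops neutrally.",
--     ]
--     if n <= 0:
--         return []
--     reps = -(-n // len(seed_q))
--     return (seed_q * reps)[:n]
-- ===== Notes on version B (the rewrite author's own statement) =====
-- stated objective: idiomatic
-- what changed: Replaces the element-by-element while loop with modulo indexing by ceiling-division repetition count, list multiplication and a slice; non-positive n returns [] via an explicit guard.
import Mathlib
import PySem

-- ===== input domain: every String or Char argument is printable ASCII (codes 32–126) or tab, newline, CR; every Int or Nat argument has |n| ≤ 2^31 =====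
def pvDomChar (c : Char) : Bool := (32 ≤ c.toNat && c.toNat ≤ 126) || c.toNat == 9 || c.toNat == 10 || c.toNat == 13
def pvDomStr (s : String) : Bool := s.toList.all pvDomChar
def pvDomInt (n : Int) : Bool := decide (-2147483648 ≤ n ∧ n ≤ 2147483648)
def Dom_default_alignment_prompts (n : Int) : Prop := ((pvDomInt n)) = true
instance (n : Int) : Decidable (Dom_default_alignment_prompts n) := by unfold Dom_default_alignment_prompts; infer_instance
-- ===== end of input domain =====

-- B replaces A's element-by-element while loop (modulo indexing, growing accumulator)
-- with ceiling-division repetition count, list multiplication and a slice (idiomatic).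

-- the shared seed_q literal
def pvSeed : List String := [
  "Explain the environmental impact of electric vehicles.",
  "How should I apologize to a colleague professionally?",
  "Summarize key points of a recent news article about inflation.",
  "What are the trade-offs between privacy and personalization?",
  "Describe steps to troubleshoot a network outage.",
  "Give feedback on this paragraph to improve clarity.",
  "Outline a plan to learn Python efficiently.",
  "Draft a response to a critical customer review.",
  "Explain backpropagation to a high-school student.",
  "Describe benefits and risks of GM crops neutrally."]

-- ===== PORT A =====
-- the while loop: while len(out) < n: out.append(seed_q[i % len(seed_q)]); i += 1
-- (seed_q[i % 10] is always in range since i ≥ 0, so .getD "" never fires)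
def daLoop (n : Int) (out : List String) (i : Int) : List String :=
  if (out.length : Int) < n then
    daLoop n (out ++ [(PySem.List.pyGet? pvSeed (PySem.Int.mod i (pvSeed.length : Int))).getD ""]) (i + 1)
  else out
termination_by (n - out.length).toNat
decreasing_by simp only [List.length_append, List.length_cons, List.length_nil]; omega

def default_alignment_prompts (n : Int) : List String := daLoop n [] 0

-- ===== PORT B =====
def default_alignment_prompts_alt (n : Int) : List String :=
  if n ≤ 0 then []
  else
    let reps : Int := -(PySem.Int.floordiv (-n) (pvSeed.length : Int))
    PySem.List.slice ((List.replicate reps.toNat pvSeed).flatten) none (some n)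

-- ===== PRECONDITION & SPEC =====
def Spec_default_alignment_prompts (n : Int) (out : List String) : Prop := out = default_alignment_prompts_alt n
instance (n : Int) (out : List String) : Decidable (Spec_default_alignment_prompts n out) := by unfold Spec_default_alignment_prompts; infer_instance

-- ===== CLAIM (what is proved, stated in full; the proofs are below) =====
def Claim_equal_default_alignment_prompts : Prop := ∀ (n : Int), Dom_default_alignment_prompts n → Spec_default_alignment_prompts n (default_alignment_prompts n)

-- ===== LEMMAS AND PROOFS =====

-- the one element appended at loop counter i
def pvF (i : Int) : String := (PySem.List.pyGet? pvSeed (PySem.Int.mod i (pvSeed.length : Int))).getD ""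

theorem pvSeed_len : pvSeed.length = 10 := rfl

theorem pvF_natCast (j : Nat) : pvF (j : Int) = pvSeed.getD (j % 10) "" := by
  unfold pvF
  rw [pvSeed_len, PySem.Int.mod_natCast j 10, PySem.List.pyGet?_natCast]
  rw [List.getD_eq_getElem?_getD]

theorem daLoop_eq (n : Int) : ∀ (m : Nat) (out : List String) (i : Int),
    m = (n - out.length).toNat →
    daLoop n out i = out ++ (List.range m).map (fun (j : Nat) => pvF (i + (j : Int))) := by
  intro m
  induction m with
  | zero =>
    intro out i hm
    rw [daLoop]
    have : ¬ ((out.length : Int) < n) := by omega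
    simp [this]
  | succ m ih =>
    intro out i hm
    rw [daLoop]
    have hlt : (out.length : Int) < n := by omega
    rw [if_pos hlt,
        show (PySem.List.pyGet? pvSeed (PySem.Int.mod i (pvSeed.length : Int))).getD "" = pvF i from rfl,
        ih (out ++ [pvF i]) (i + 1) (by simp; omega)]
    rw [List.range_succ_eq_map, List.map_cons, List.map_map, List.append_assoc,
        List.singleton_append]
    congr 1
    congr 1
    · congr 1
      push_cast
      ring
    · apply List.map_congr_left
      intro j _
      simp only [Function.comp_apply]
      congr 1
      push_cast
      ring

theorem flatten_replicate (r : Nat) :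
    (List.replicate r pvSeed).flatten = (List.range (10 * r)).map (fun j => pvSeed.getD (j % 10) "") := by
  induction r with
  | zero => simp
  | succ r ih =>
    rw [List.replicate_succ', List.flatten_append, ih,
        show 10 * (r + 1) = 10 * r + 10 from by ring,
        List.range_add, List.map_append, List.map_map]
    congr 1
    have hcong : List.map ((fun j => pvSeed.getD (j % 10) "") ∘ fun j => 10 * r + j) (List.range 10)
        = List.map (fun j => pvSeed.getD (j % 10) "") (List.range 10) := by
      apply List.map_congr_left
      intro j hj
      have : j < 10 := List.mem_range.mp hj
      simp only [Function.comp_apply]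
      congr 1
      omega
    rw [hcong]
    decide

-- ===== VERDICT (by name: the statement is the Claim_ definition above) =====
theorem default_alignment_prompts_spec : Claim_equal_default_alignment_prompts := by
  unfold Claim_equal_default_alignment_prompts Spec_default_alignment_prompts
  intro n _
  unfold default_alignment_prompts default_alignment_prompts_alt
  rw [daLoop_eq n (n.toNat) [] 0 (by simp)]
  by_cases hn : n ≤ 0
  · have : n.toNat = 0 := by omega
    simp [hn, this]
  · rw [if_neg hn]
    have hlen : (pvSeed.length : Int) = 10 := by norm_num [pvSeed_len]
    rw [hlen]
    set r : Int := -(PySem.Int.floordiv (-n) (10 : Int)) with hr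
    have hdm := PySem.Int.floordiv_mul_add_mod (-n) (10 : Int)
    have hm0 := PySem.Int.mod_nonneg (-n) (by omega : (0:Int) < 10)
    have hmlt := PySem.Int.mod_lt (-n) (by omega : (0:Int) < 10)
    have hbound : n ≤ 10 * r := by rw [hr]; omega
    have hr0 : 0 ≤ r := by omega
    rw [PySem.List.slice_to _ (by omega : (0:Int) ≤ n)]
    rw [flatten_replicate r.toNat, ← List.map_take, List.take_range]
    have hmin : min n.toNat (10 * r.toNat) = n.toNat := by omega
    rw [hmin, List.nil_append]
    apply List.map_congr_left
    intro j _
    rw [zero_add]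
    exact pvF_natCast j
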